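-- pv_equiv track=rewrite | github.com/wxxk/ALGORITHM | programmers/120843. 공 던지기/programmers_120843.py | solution
-- ===== SOURCE A (Python) =====
-- def solution(numbers, k):
--     answer = 0
--     index = 0
--
--     for i in range(1, k):
--         index += 2
--         index = index % len(numbers)
--
--     answer = numbers[index]
--     return answer
-- ===== SOURCE B (Python) =====
-- def solution(numbers, k):
--     return numbers[2 * max(k - 1, 0) % len(numbers)]
-- ===== Notes on version B (the rewrite author's own statement) =====
-- stated objective: faster
-- what changed: Replaces the O(k) loop that adds 2 and reduces mod len each throw with the closed-form index 2*max(k-1,0) % len(numbers).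
import Mathlib
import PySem

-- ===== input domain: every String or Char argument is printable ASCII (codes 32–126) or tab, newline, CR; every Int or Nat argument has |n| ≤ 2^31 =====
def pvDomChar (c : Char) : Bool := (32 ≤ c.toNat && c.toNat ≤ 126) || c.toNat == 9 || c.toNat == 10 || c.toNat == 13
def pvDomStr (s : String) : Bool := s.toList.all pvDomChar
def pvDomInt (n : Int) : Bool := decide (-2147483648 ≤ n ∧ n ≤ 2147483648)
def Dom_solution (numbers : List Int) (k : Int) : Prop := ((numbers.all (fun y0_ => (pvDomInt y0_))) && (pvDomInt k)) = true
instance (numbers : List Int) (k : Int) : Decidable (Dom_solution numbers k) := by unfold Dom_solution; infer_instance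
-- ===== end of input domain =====

-- B replaces A's O(k) loop (index += 2; index %= len) with the closed-form index 2*max(k-1,0) % len(numbers).
-- ===== PORT A =====
def solution (numbers : List Int) (k : Int) : Int :=
  let index := (PySem.List.pyRange 1 k 1).foldl
    (fun index _i => PySem.Int.mod (index + 2) (numbers.length : Int)) 0
  (PySem.List.pyGet? numbers index).getD 0

-- ===== PORT B =====
def solution_alt (numbers : List Int) (k : Int) : Int :=
  (PySem.List.pyGet? numbers (PySem.Int.mod (2 * max (k - 1) 0) (numbers.length : Int))).getD 0

-- ===== PRECONDITION & SPEC =====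
-- Pre_ excludes the empty list, on which A raises (ZeroDivisionError for k > 1, IndexError otherwise).
def Pre_solution (numbers : List Int) (k : Int) : Prop := numbers ≠ []
instance (numbers : List Int) (k : Int) : Decidable (Pre_solution numbers k) := by unfold Pre_solution; infer_instance
def pvWitness_solution : List Int × Int := ([1, 2, 3], 5)

def Spec_solution (numbers : List Int) (k : Int) (out : Int) : Prop := out = solution_alt numbers k
instance (numbers : List Int) (k : Int) (out : Int) : Decidable (Spec_solution numbers k out) := by unfold Spec_solution; infer_instance

-- ===== CLAIM (what is proved, stated in full; the proofs are below) =====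
def Claim_equal_solution : Prop := ∀ (numbers : List Int) (k : Int), Dom_solution numbers k → Pre_solution numbers k → Spec_solution numbers k (solution numbers k)

-- ===== LEMMAS AND PROOFS =====

-- ===== VERDICT (by name: the statement is the Claim_ definition above) =====
-- loop invariant: after the throws 2..(1+m), index = (2*m) % n
theorem solution_loop (n : Int) (hn : 0 < n) (m : Nat) :
    (PySem.List.pyRange 1 (1 + (m : Int)) 1).foldl
      (fun index _i => PySem.Int.mod (index + 2) n) 0 = PySem.Int.mod (2 * (m : Int)) n := by
  induction m with
  | zero => simp [PySem.List.pyRange_one_eq_nil, PySem.Int.mod_eq_emod_of_pos hn]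
  | succ m ih =>
    have h : (1 : Int) + ((m : Int) + 1) = (1 + (m : Int)) + 1 := by ring
    push_cast
    rw [h, PySem.List.pyRange_one_succ_right (by omega), List.foldl_append]
    push_cast at ih
    simp only [List.foldl, ih]
    simp only [PySem.Int.mod_eq_emod_of_pos hn]
    rw [Int.emod_add_emod]
    ring_nf

theorem solution_spec : Claim_equal_solution := by
  intro numbers k _ hpre
  have hn : (0 : Int) < (numbers.length : Int) := by
    have := List.length_pos_iff.mpr hpre; exact_mod_cast this
  unfold Spec_solution solution solution_alt
  by_cases hk : k ≤ 1
  · rw [PySem.List.pyRange_one_eq_nil hk]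
    have h1 : max (k - 1) 0 = 0 := by omega
    simp [h1, PySem.Int.mod_eq_emod_of_pos hn]
  · have hm : k = 1 + ((k - 1).toNat : Int) := by omega
    rw [hm, solution_loop _ hn]
    have h2 : max ((1 + ((k - 1).toNat : Int)) - 1) 0 = ((k - 1).toNat : Int) := by omega
    rw [h2]
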